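-- pv_equiv track=rewrite | github.com/mzhao98/mzhao98.github.io | tutorials/tutorial_notebooks/files_for_mdp/interaction_mdp.py | convert_state_to_feature_vector
-- ===== SOURCE A (Python) =====
-- SQUARE = 'square'
--
-- def convert_state_to_feature_vector(state):
--     feature_vector = [0] * 4
--     for item in state['objects_in_g1']:
--         if item == SQUARE:
--             feature_vector[0] += 1
--         else:
--             feature_vector[2] += 1
--
--     for item in state['objects_in_g2']:
--         if item == SQUARE:
--             feature_vector[1] += 1
--         else:
--             feature_vector[3] += 1
--     return feature_vector
-- ===== SOURCE B (Python) =====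
-- SQUARE = 'square'
--
-- def _hist(items):
--     h = {}
--     for x in items:
--         h[x] = h.get(x, 0) + 1
--     return h
--
-- def convert_state_to_feature_vector(state):
--     h1 = _hist(state['objects_in_g1'])
--     h2 = _hist(state['objects_in_g2'])
--     s1 = h1.get(SQUARE, 0)
--     s2 = h2.get(SQUARE, 0)
--     return [s1, s2, sum(h1.values()) - s1, sum(h2.values()) - s2]
-- ===== Notes on version B (the rewrite author's own statement) =====
-- stated objective: alternative
-- what changed: B builds a per-list histogram dict with a generic counting loop (no branch on SQUARE inside the loop), then reads the square count by dict lookup and derives the other count as the sum of all histogram values minus the square count; A increments four fixed buckets with an if/else per item.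
import Mathlib
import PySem

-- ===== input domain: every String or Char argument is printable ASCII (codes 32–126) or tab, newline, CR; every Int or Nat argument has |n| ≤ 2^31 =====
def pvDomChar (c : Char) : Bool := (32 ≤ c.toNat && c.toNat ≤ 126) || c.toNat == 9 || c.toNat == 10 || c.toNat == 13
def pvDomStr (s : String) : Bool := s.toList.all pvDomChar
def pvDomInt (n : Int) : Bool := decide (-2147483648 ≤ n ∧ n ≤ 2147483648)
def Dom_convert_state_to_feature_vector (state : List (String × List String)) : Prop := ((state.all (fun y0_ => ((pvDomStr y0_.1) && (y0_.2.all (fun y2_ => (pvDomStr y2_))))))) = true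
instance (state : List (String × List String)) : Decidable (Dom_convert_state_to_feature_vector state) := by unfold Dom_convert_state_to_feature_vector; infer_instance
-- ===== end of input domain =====

-- B replaces A's branching four-bucket loops by a per-list histogram dict: one generic counting
-- loop per list, then a lookup for the square count and sum-of-values minus squares for the rest
-- (objective: alternative; same cost).

-- ===== PORT A =====
-- one loop body: 'if item == SQUARE: fv[i] += 1 else: fv[j] += 1'
def pvStepA (i j : Nat) (fv : List Int) (item : String) : List Int :=
  if item == "square" then fv.set i (fv.getD i 0 + 1) else fv.set j (fv.getD j 0 + 1)

def convert_state_to_feature_vector (state : List (String × List String)) : List Int :=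
  match (PySem.Dict.mk state).get? "objects_in_g1", (PySem.Dict.mk state).get? "objects_in_g2" with
  | some g1, some g2 =>
      let fv1 := g1.foldl (pvStepA 0 2) [0, 0, 0, 0]
      g2.foldl (pvStepA 1 3) fv1
  | _, _ => []   -- KeyError in Python: excluded by Pre_

-- ===== PORT B =====
-- _hist: h = {}; for x in items: h[x] = h.get(x, 0) + 1
def pvHist (items : List String) : PySem.Dict String Int :=
  items.foldl (fun h x => h.insert x (h.getD x 0 + 1)) PySem.Dict.empty

-- sum(vs)
def pvSumValues (vs : List Int) : Int := vs.foldl (· + ·) 0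

def convert_state_to_feature_vector_alt (state : List (String × List String)) : List Int :=
  match (PySem.Dict.mk state).get? "objects_in_g1" with
  | none => []   -- KeyError in Python: excluded by Pre_
  | some g1 =>
    match (PySem.Dict.mk state).get? "objects_in_g2" with
    | none => []   -- KeyError in Python: excluded by Pre_
    | some g2 =>
      let h1 := pvHist g1
      let h2 := pvHist g2
      let s1 := h1.getD "square" 0
      let s2 := h2.getD "square" 0
      [s1, s2, pvSumValues h1.values - s1, pvSumValues h2.values - s2]

-- ===== PRECONDITION & SPEC =====
-- Pre_ excludes exactly the states on which Python A (and B) raises KeyError: a missing 'objects_in_g1' or 'objects_in_g2' key.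
def Pre_convert_state_to_feature_vector (state : List (String × List String)) : Prop :=
  ((PySem.Dict.mk state).get? "objects_in_g1").isSome ∧ ((PySem.Dict.mk state).get? "objects_in_g2").isSome
instance (state : List (String × List String)) : Decidable (Pre_convert_state_to_feature_vector state) := by unfold Pre_convert_state_to_feature_vector; infer_instance
def pvWitness_convert_state_to_feature_vector : (List (String × List String)) :=
  [("objects_in_g1", ["square", "circle"]), ("objects_in_g2", [])]

def Spec_convert_state_to_feature_vector (state : List (String × List String)) (out : List Int) : Prop := out = convert_state_to_feature_vector_alt state
instance (state : List (String × List String)) (out : List Int) : Decidable (Spec_convert_state_to_feature_vector state out) := by unfold Spec_convert_state_to_feature_vector; infer_instance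

-- ===== CLAIM (what is proved, stated in full; the proofs are below) =====
def Claim_equal_convert_state_to_feature_vector : Prop := ∀ (state : List (String × List String)), Dom_convert_state_to_feature_vector state → Pre_convert_state_to_feature_vector state → Spec_convert_state_to_feature_vector state (convert_state_to_feature_vector state)

-- ===== LEMMAS AND PROOFS =====

-- A-side: count of "square" in a list, as an Int
def pvCnt : List String → Int
  | [] => 0
  | x :: t => (if x == "square" then 1 else 0) + pvCnt t

theorem pvCnt_eq_count (g : List String) : pvCnt g = (g.count "square" : Int) := by
  induction g with
  | nil => simp [pvCnt]
  | cons x t ih =>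
      simp only [pvCnt, ih, List.count_cons]
      by_cases h : x = "square" <;> simp [h] <;> ring

theorem foldlA1 (g : List String) : ∀ a b c d : Int,
    g.foldl (pvStepA 0 2) [a, b, c, d] =
      [a + pvCnt g, b, c + ((g.length : Int) - pvCnt g), d] := by
  induction g with
  | nil => intro a b c d; simp [pvCnt]
  | cons x t ih =>
      intro a b c d
      simp only [List.foldl, pvStepA, pvCnt]
      split <;> simp [List.set, List.getD, ih] <;> push_cast <;> ring_nf <;> simp

theorem foldlA2 (g : List String) : ∀ a b c d : Int,
    g.foldl (pvStepA 1 3) [a, b, c, d] =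
      [a, b + pvCnt g, c, d + ((g.length : Int) - pvCnt g)] := by
  induction g with
  | nil => intro a b c d; simp [pvCnt]
  | cons x t ih =>
      intro a b c d
      simp only [List.foldl, pvStepA, pvCnt]
      split <;> simp [List.set, List.getD, ih] <;> push_cast <;> ring_nf <;> simp

-- B-side: the histogram loop is Counter(xs)
theorem pvHist_eq_counter (xs : List String) : pvHist xs = PySem.Dict.counter xs :=
  PySem.Dict.foldl_insert_getD_add_one_eq_counter xs

theorem pvSumValues_eq_sum (vs : List Int) : pvSumValues vs = vs.sum := by
  unfold pvSumValues
  rw [← List.sum_eq_foldl]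

-- the values of Counter(xs) sum to xs.length
theorem sum_values_counter (xs : List String) :
    (PySem.Dict.counter xs).values.sum = (xs.length : Int) := by
  have hv : (PySem.Dict.counter xs).values
      = (PySem.Set.ofList xs).map (fun k => (xs.count k : Int)) := by
    show ((PySem.Dict.counter xs).items.map (·.2))
        = (PySem.Set.ofList xs).map (fun k => (xs.count k : Int))
    rw [PySem.Dict.items_counter]
    simp [List.map_map, Function.comp]
  rw [hv]
  have hperm : List.Perm (PySem.Set.ofList xs) xs.dedup := by
    rw [(List.perm_ext_iff_of_nodup (PySem.Set.nodup_ofList xs) xs.nodup_dedup)]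
    intro a
    rw [← PySem.List.dedup_eq_ofList, PySem.List.mem_dedup, List.mem_dedup]
  calc ((PySem.Set.ofList xs).map (fun k => (xs.count k : Int))).sum
      = (xs.dedup.map (fun k => (xs.count k : Int))).sum :=
        (hperm.map (fun k => (xs.count k : Int))).sum_eq
    _ = ((xs.dedup.map (fun k => xs.count k)).map (fun n : Nat => (n : Int))).sum := by
        rw [List.map_map]; rfl
    _ = (((xs.dedup.map (fun k => xs.count k)).sum : Nat) : Int) :=
        (Nat.cast_list_sum _).symm
    _ = (xs.length : Int) := by
        rw [List.sum_map_count_dedup_eq_length]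

-- ===== VERDICT (by name: the statement is the Claim_ definition above) =====
theorem convert_state_to_feature_vector_spec : Claim_equal_convert_state_to_feature_vector := by
  intro state _ hpre
  obtain ⟨h1, h2⟩ := hpre
  unfold Spec_convert_state_to_feature_vector
  unfold convert_state_to_feature_vector convert_state_to_feature_vector_alt
  obtain ⟨g1, hg1⟩ := Option.isSome_iff_exists.mp h1
  obtain ⟨g2, hg2⟩ := Option.isSome_iff_exists.mp h2
  rw [hg1, hg2]
  simp only [foldlA1, foldlA2, pvCnt_eq_count, pvHist_eq_counter, pvSumValues_eq_sum,
    PySem.Dict.getD_counter, sum_values_counter]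
  ring_nf
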